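-- pv_equiv track=rewrite | github.com/UMBC-CMSC-Hamilton/cmsc201-fall22 | 12-12 Final Review/final_review_1pm.py | a_distance
-- ===== SOURCE A (Python) =====
-- def a_distance(the_string):
--     a_start = -1
--     min_dist = len(the_string) + 1
--     for i in range(len(the_string)):
--         if the_string[i] == 'a' and a_start == -1:
--             a_start = i
--         elif the_string[i] == 'a' and a_start >= 0:
--             distance = i - a_start
--             if distance < min_dist:
--                 min_dist = distance
--             a_start = i
--
--     return min_dist
-- ===== SOURCE B (Python) =====
-- def a_distance(the_string):
--     parts = the_string.split('a')
--     if len(parts) < 3: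
--         return len(the_string) + 1
--     return 1 + min(len(p) for p in parts[1:-1])
-- ===== Notes on version B (the rewrite author's own statement) =====
-- stated objective: simpler
-- what changed: Replaces A's one-pass state machine (last-'a' sentinel -1 plus running minimum) by splitting the string on 'a': the answer is 1 + the length of the shortest segment strictly between two 'a's, default len(the_string)+1 when the split yields fewer than three parts.
import Mathlib
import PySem

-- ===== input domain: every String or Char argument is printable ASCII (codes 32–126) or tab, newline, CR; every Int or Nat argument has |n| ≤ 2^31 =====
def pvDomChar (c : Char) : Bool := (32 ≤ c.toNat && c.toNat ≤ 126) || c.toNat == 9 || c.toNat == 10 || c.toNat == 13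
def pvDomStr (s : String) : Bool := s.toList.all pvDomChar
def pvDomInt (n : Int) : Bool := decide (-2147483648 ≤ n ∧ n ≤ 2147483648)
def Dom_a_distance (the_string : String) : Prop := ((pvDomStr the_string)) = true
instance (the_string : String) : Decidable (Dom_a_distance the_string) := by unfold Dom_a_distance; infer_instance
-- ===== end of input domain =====

-- B replaces A's one-pass sentinel state machine by splitting the string on 'a':
-- the minimum gap is 1 + the length of the shortest segment strictly between two 'a's
-- (default len+1 when there are fewer than two 'a's); simpler, same cost.

-- ===== PORT A =====
def a_distance (the_string : String) : Int :=
  let st := (PySem.List.pyRange 0 (PySem.Str.len the_string) 1).foldl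
    (fun (st : Int × Int) (i : Int) =>
      if PySem.List.pyGetD the_string.toList i ' ' = 'a' ∧ st.1 = -1 then
        (i, st.2)
      else if PySem.List.pyGetD the_string.toList i ' ' = 'a' ∧ 0 ≤ st.1 then
        let distance := i - st.1
        (i, if distance < st.2 then distance else st.2)
      else st)
    (-1, PySem.Str.len the_string + 1)
  st.2

-- ===== PORT B =====
-- the_string.split('a') is ported as List.splitOn 'a' on the code points,
-- which is exact for a single-character separator.
def a_distance_alt (the_string : String) : Int :=
  let parts := the_string.toList.splitOn 'a'
  if parts.length < 3 then PySem.Str.len the_string + 1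
  else 1 + PySem.List.minD
    ((PySem.List.slice parts (some 1) (some (-1))).map (fun p => (p.length : Int)))
    (fun x => x) 0

-- ===== PRECONDITION & SPEC =====
def Spec_a_distance (the_string : String) (out : Int) : Prop := out = a_distance_alt the_string
instance (the_string : String) (out : Int) : Decidable (Spec_a_distance the_string out) := by unfold Spec_a_distance; infer_instance

-- ===== CLAIM (what is proved, stated in full; the proofs are below) =====
def Claim_equal_a_distance : Prop := ∀ (the_string : String), Dom_a_distance the_string → Spec_a_distance the_string (a_distance the_string)

-- ===== LEMMAS AND PROOFS =====

-- A's loop body as a function of (state, (index, char)).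
def stepE (st : Int × Int) (p : Int × Char) : Int × Int :=
  if p.2 = 'a' ∧ st.1 = -1 then (p.1, st.2)
  else if p.2 = 'a' ∧ 0 ≤ st.1 then (p.1, if p.1 - st.1 < st.2 then p.1 - st.1 else st.2)
  else st

-- The 'a' indices of cs, counting from s.
def aIdx (cs : List Char) (s : Int) : List Int :=
  (PySem.List.enumerate cs s).filterMap (fun p => if p.2 = 'a' then some p.1 else none)

-- Consecutive differences.
def diffs (l : List Int) : List Int := (l.zip l.tail).map (fun q => q.2 - q.1)

lemma aIdx_nil (s : Int) : aIdx [] s = [] := rfl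

lemma aIdx_cons (c : Char) (cs : List Char) (s : Int) :
    aIdx (c :: cs) s = if c = 'a' then s :: aIdx cs (s + 1) else aIdx cs (s + 1) := by
  simp [aIdx, PySem.List.enumerate_cons, List.filterMap_cons]
  split_ifs <;> simp

lemma mem_aIdx (cs : List Char) (s i : Int) (h : i ∈ aIdx cs s) :
    s ≤ i ∧ i < s + cs.length := by
  induction cs generalizing s with
  | nil => simp [aIdx_nil] at h
  | cons c cs ih =>
    rw [aIdx_cons] at h
    split_ifs at h with hc
    · rcases List.mem_cons.mp h with rfl | h
      · simp only [List.length_cons]; constructor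
        · exact le_rfl
        · push_cast; omega
      · have := ih (s + 1) h; simp at *; omega
    · have := ih (s + 1) h; simp at *; omega

lemma diffs_cons_cons (a b : Int) (l : List Int) :
    diffs (a :: b :: l) = (b - a) :: diffs (b :: l) := rfl

-- A's fold over enumerated characters equals min-folding md over the consecutive
-- gaps of the 'a'-index list (with the pending last-'a' index p prepended when set).
lemma fold_stepE (cs : List Char) (s p md : Int) (hs : 0 ≤ s) (hp : p = -1 ∨ 0 ≤ p) :
    (List.foldl stepE (p, md) (PySem.List.enumerate cs s)).2
      = List.foldl min md (diffs ((if p = -1 then [] else [p]) ++ aIdx cs s)) := by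
  induction cs generalizing s p md with
  | nil =>
    rcases hp with rfl | hp
    · simp [aIdx_nil, diffs]
    · by_cases h : p = -1 <;> simp [aIdx_nil, diffs, h, PySem.List.enumerate_nil]
  | cons c cs ih =>
    rw [PySem.List.enumerate_cons, List.foldl_cons, aIdx_cons]
    by_cases hc : c = 'a'
    · rcases hp with rfl | hp
      · have hstep : stepE (-1, md) (s, c) = (s, md) := by simp [stepE, hc]
        rw [hstep, ih (s + 1) s md (by omega) (Or.inr hs)]
        have hs' : ¬ (s = -1) := by omega
        simp only [if_pos hc, if_neg hs', List.singleton_append, if_true, List.nil_append]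
      · have hpne : p ≠ -1 := by omega
        have hstep : stepE (p, md) (s, c) = (s, if s - p < md then s - p else md) := by
          simp [stepE, hc, hp]; omega
        rw [hstep, ih (s + 1) s _ (by omega) (Or.inr hs)]
        have hs' : ¬ (s = -1) := by omega
        simp only [if_pos hc, if_neg hs', if_neg hpne, List.singleton_append]
        rw [diffs_cons_cons, List.foldl_cons]
        congr 1
        by_cases h : s - p < md
        · rw [if_pos h, min_eq_right (le_of_lt h)]
        · rw [if_neg h, min_eq_left (by omega)]
    · have hstep : stepE (p, md) (s, c) = (p, md) := by simp [stepE, hc]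
      rw [hstep, ih (s + 1) p md (by omega) hp]
      simp [hc]

lemma foldl_min_eq_minD (D : List Int) (d : Int) (h : ∀ x ∈ D, x < d) :
    List.foldl min d D = PySem.List.minD D (fun x => x) d := by
  cases D with
  | nil => rfl
  | cons x t =>
    rw [PySem.List.minD, PySem.List.min?_id_cons]
    have hx : min d x = x := min_eq_right (le_of_lt (h x (List.mem_cons_self)))
    simp [List.foldl_cons, hx]

lemma a_distance_eq_fold (s : String) :
    a_distance s
      = (List.foldl stepE (-1, (s.toList.length : Int) + 1)
          (PySem.List.enumerate s.toList 0)).2 := by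
  unfold a_distance
  rw [PySem.List.enumerate_eq_map_pyRange s.toList ' ', List.foldl_map]
  simp [stepE, PySem.Str.len]

-- splitOn 'a' on a list of characters, one step.
lemma splitOn_char_cons (c : Char) (cs : List Char) :
    (c :: cs).splitOn 'a'
      = if c = 'a' then [] :: cs.splitOn 'a'
        else (cs.splitOn 'a').modifyHead (c :: ·) := by
  simp only [List.splitOn, List.splitOnP_cons]
  by_cases hc : c = 'a' <;> simp [hc]

lemma splitOn_char_ne_nil (cs : List Char) : cs.splitOn 'a' ≠ [] :=
  List.splitOnP_ne_nil _ _

lemma length_splitOn_char (cs : List Char) :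
    (cs.splitOn 'a').length = cs.countP (· == 'a') + 1 := by
  induction cs with
  | nil => rfl
  | cons c cs ih =>
    rw [splitOn_char_cons, List.countP_cons]
    by_cases hc : c = 'a' <;> simp [hc, ih]

lemma aIdx_eq_nil_iff (cs : List Char) (s : Int) :
    aIdx cs s = [] ↔ cs.countP (· == 'a') = 0 := by
  induction cs generalizing s with
  | nil => simp [aIdx_nil]
  | cons c cs ih =>
    rw [aIdx_cons, List.countP_cons]
    by_cases hc : c = 'a' <;> simp [hc, ih (s + 1)]

-- With a pending 'a' at index s-1: the gaps are 1 + the lengths of all parts but the last.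
lemma diffs_pending (cs : List Char) (s : Int) :
    diffs ((s - 1) :: aIdx cs s)
      = ((cs.splitOn 'a').dropLast).map (fun q => (q.length : Int) + 1) := by
  induction cs generalizing s with
  | nil => simp [aIdx_nil, diffs, List.splitOn]
  | cons c cs ih =>
    rw [aIdx_cons, splitOn_char_cons]
    by_cases hc : c = 'a'
    · rw [if_pos hc, if_pos hc, diffs_cons_cons,
        List.dropLast_cons_of_ne_nil (splitOn_char_ne_nil cs), List.map_cons]
      have hih := ih (s + 1)
      rw [show (s : Int) + 1 - 1 = s from by ring] at hih
      rw [hih, show s - (s - 1) = (1 : Int) from by ring]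
      simp
    · rw [if_neg hc, if_neg hc]
      by_cases h0 : cs.countP (· == 'a') = 0
      · have hnil : aIdx cs (s + 1) = [] := (aIdx_eq_nil_iff cs (s + 1)).mpr h0
        have hlen : (cs.splitOn 'a').length = 1 := by rw [length_splitOn_char, h0]
        obtain ⟨x, hx⟩ := List.length_eq_one_iff.mp hlen
        rw [hnil, hx]
        simp [diffs]
      · rcases hparts : cs.splitOn 'a' with _ | ⟨x, rest⟩
        · exact absurd hparts (splitOn_char_ne_nil cs)
        rcases rest with _ | ⟨y, ts⟩
        · exfalso
          have hl := length_splitOn_char cs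
          rw [hparts] at hl
          simp only [List.length_cons, List.length_nil] at hl
          omega
        rcases hidx : aIdx cs (s + 1) with _ | ⟨i, t⟩
        · exact absurd ((aIdx_eq_nil_iff cs (s + 1)).mp hidx) h0
        have hih := ih (s + 1)
        rw [show (s : Int) + 1 - 1 = s from by ring, hparts, hidx,
          List.dropLast_cons_of_ne_nil (by simp), List.map_cons, diffs_cons_cons] at hih
        obtain ⟨e1, e2⟩ := List.cons_eq_cons.mp hih
        rw [List.modifyHead_cons, List.dropLast_cons_of_ne_nil (by simp),
          List.map_cons, diffs_cons_cons, e2]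
        have hhead : i - (s - 1) = ((c :: x).length : Int) + 1 := by
          simp only [List.length_cons]
          push_cast
          omega
        rw [hhead]

-- The gaps of the whole string are 1 + the lengths of the inner parts of the split.
lemma diffs_aIdx_splitOn (cs : List Char) (s : Int) :
    diffs (aIdx cs s)
      = (((cs.splitOn 'a').drop 1).dropLast).map (fun q => (q.length : Int) + 1) := by
  induction cs generalizing s with
  | nil => simp [aIdx, diffs, List.splitOn]
  | cons c cs ih =>
    rw [aIdx_cons, splitOn_char_cons]
    by_cases hc : c = 'a'
    · rw [if_pos hc, if_pos hc, List.drop_one, List.tail_cons]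
      have h := diffs_pending cs (s + 1)
      rw [show (s : Int) + 1 - 1 = s from by ring] at h
      exact h
    · rw [if_neg hc, if_neg hc]
      rcases hparts : cs.splitOn 'a' with _ | ⟨x, rest⟩
      · exact absurd hparts (splitOn_char_ne_nil cs)
      rw [List.modifyHead_cons, List.drop_one, List.tail_cons]
      have hih := ih (s + 1)
      rw [hparts, List.drop_one, List.tail_cons] at hih
      exact hih

-- parts[1:-1] is drop 1 then dropLast.
lemma slice_one_negone {α : Type} (l : List α) :
    PySem.List.slice l (some 1) (some (-1)) = (l.drop 1).dropLast := by
  cases l with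
  | nil => rfl
  | cons a t =>
    simp [PySem.List.slice, PySem.List.clampIdx, List.dropLast_eq_take]
    rw [if_neg (by omega : ¬ ((t.length : Int) < 0))]
    omega

lemma foldl_min_succ (L : List Int) (a : Int) :
    List.foldl min (a + 1) (L.map (· + 1)) = (List.foldl min a L) + 1 := by
  induction L generalizing a with
  | nil => rfl
  | cons b t ih =>
    rw [List.map_cons, List.foldl_cons, List.foldl_cons, min_add_add_right]
    exact ih (min a b)

theorem a_distance_spec_aux (s : String) : a_distance s = a_distance_alt s := by
  rw [a_distance_eq_fold,
      fold_stepE s.toList 0 (-1) ((s.toList.length : Int) + 1) le_rfl (Or.inl rfl)]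
  simp only [List.nil_append, reduceIte]
  simp only [a_distance_alt]
  rw [slice_one_negone, diffs_aIdx_splitOn s.toList 0]
  set parts := s.toList.splitOn 'a' with hparts
  by_cases hlt : parts.length < 3
  · have hne : parts ≠ [] := splitOn_char_ne_nil s.toList
    have hmid : ((parts.drop 1).dropLast) = [] := by
      apply List.length_eq_zero_iff.mp
      have h1 : 1 ≤ parts.length := List.length_pos_of_ne_nil hne
      simp only [List.length_dropLast, List.length_drop]
      omega
    rw [hmid, if_pos hlt]
    simp [PySem.Str.len]
  · rcases hmid : (parts.drop 1).dropLast with _ | ⟨x, t⟩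
    · exfalso
      have h0 : ((parts.drop 1).dropLast).length = 0 := by rw [hmid]; rfl
      simp only [List.length_dropLast, List.length_drop] at h0
      omega
    rw [if_neg hlt]
    -- every gap is < len + 1
    have hbound : ∀ v ∈ ((x :: t).map (fun q => ((q.length : Int) + 1))),
        v < (s.toList.length : Int) + 1 := by
      intro v hv
      have hd : v ∈ diffs (aIdx s.toList 0) := by
        rw [diffs_aIdx_splitOn s.toList 0, ← hparts, hmid]; exact hv
      simp only [diffs, List.mem_map] at hd
      obtain ⟨q, hq, rfl⟩ := hd
      have h1 := (List.of_mem_zip hq).1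
      have h2 := List.mem_of_mem_tail (List.of_mem_zip hq).2
      have b1 := mem_aIdx s.toList 0 q.1 h1
      have b2 := mem_aIdx s.toList 0 q.2 h2
      omega
    rw [foldl_min_eq_minD _ _ hbound]
    have hmap : ((x :: t).map (fun q => ((q.length : Int) + 1)))
        = ((x :: t).map (fun q => (q.length : Int))).map (· + 1) := by
      rw [List.map_map]; rfl
    rw [hmap, List.map_cons, PySem.List.minD, PySem.List.minD, List.map_cons,
      PySem.List.min?_id_cons, PySem.List.min?_id_cons, Option.getD_some, Option.getD_some,
      foldl_min_succ]
    ring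

-- ===== VERDICT (by name: the statement is the Claim_ definition above) =====
theorem a_distance_spec : Claim_equal_a_distance := by
  intro s _
  unfold Spec_a_distance
  exact a_distance_spec_aux s
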